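-- pv_equiv track=rewrite | github.com/MrBrantCode/unitest_baseline | mut_generate/mist_train_cf/cf_90256/solution.py | count_digit_only_primes
-- ===== SOURCE A (Python) =====
-- import math
--
-- def count_digit_only_primes(n):
--     def is_prime(num):
--         if num <= 1:
--             return False
--         for i in range(2, int(math.sqrt(num))+1):
--             if num % i == 0:
--                 return False
--         return True
--
--     digits = set(str(n))
--     count = 0
--     for i in range(1, n+1):
--         if n % i == 0 and is_prime(i) and set(str(i)).issubset(digits):
--             count += 1
--     return count
-- ===== SOURCE B (Python) =====
-- def count_digit_only_primes(n):
--     def is_prime(num):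
--         if num <= 1:
--             return False
--         d = 2
--         while d * d <= num:
--             if num % d == 0:
--                 return False
--             d += 1
--         return True
--
--     digits = set(str(n))
--
--     def ok(i):
--         return is_prime(i) and set(str(i)) <= digits
--
--     count = 0
--     d = 1
--     while d * d <= n:
--         if n % d == 0:
--             if ok(d):
--                 count += 1
--             e = n // d
--             if e != d and ok(e):
--                 count += 1
--         d += 1
--     return count
-- ===== Notes on version B (the rewrite author's own statement) =====
-- stated objective: faster
-- what changed: Instead of scanning every i in 1..n for divisibility, B enumerates divisors in complementary pairs (d, n//d) by trial division up to sqrt(n), testing primality and the digit-subset condition only on actual divisors; primality likewise uses a d*d<=num while-loop instead of a precomputed sqrt range.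
import Mathlib
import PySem

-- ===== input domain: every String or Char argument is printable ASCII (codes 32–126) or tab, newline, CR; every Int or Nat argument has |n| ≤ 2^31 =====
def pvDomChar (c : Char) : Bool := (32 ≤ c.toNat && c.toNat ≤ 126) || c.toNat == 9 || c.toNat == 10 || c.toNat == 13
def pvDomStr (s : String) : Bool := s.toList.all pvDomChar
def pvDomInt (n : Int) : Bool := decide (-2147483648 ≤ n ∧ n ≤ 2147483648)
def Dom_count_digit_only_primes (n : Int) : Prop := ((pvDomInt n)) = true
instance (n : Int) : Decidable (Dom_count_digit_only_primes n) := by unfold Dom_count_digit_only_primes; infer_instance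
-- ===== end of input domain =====

-- B replaces A's scan of all i in 1..n by trial division up to sqrt(n) that tests each
-- complementary divisor pair (d, n//d); measurably faster (asymptotically fewer candidates).

-- termination helper used by the while-loop ports below
theorem pvLe_sq (d : Int) : d ≤ d * d := by
  rcases (by omega : d ≤ 0 ∨ 1 ≤ d) with h | h
  · exact h.trans (mul_self_nonneg d)
  · exact le_mul_of_one_le_left (by omega) (by omega)

theorem pvLoopDec (num d : Int) (h : d * d ≤ num) : (num + 1 - (d + 1)).toNat < (num + 1 - d).toNat := by
  have hd : d ≤ num := (pvLe_sq d).trans h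
  omega

-- ===== PORT A =====
-- int(math.sqrt(num)) is ported as Nat.sqrt, exact for |num| ≤ 2^31 (well below the first
-- float discrepancy near 4.5e15); the early-return for-loop is the List.all of its range.
def pvIsPrimeA (num : Int) : Bool :=
  if num ≤ 1 then false
  else (PySem.List.pyRange 2 ((num.toNat.sqrt : Int) + 1) 1).all
        (fun i => !(PySem.Int.mod num i == 0))

def count_digit_only_primes (n : Int) : Int :=
  let digits : PySem.Set Char := PySem.Set.ofList (PySem.Int.toChars n)
  (PySem.List.pyRange 1 (n + 1) 1).foldl
    (fun count i =>
      if PySem.Int.mod n i == 0 && pvIsPrimeA i &&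
          PySem.Set.issubset (PySem.Set.ofList (PySem.Int.toChars i)) digits
      then count + 1 else count) 0

-- ===== PORT B =====
def pvIsPrimeBLoop (num d : Int) : Bool :=
  if h : d * d ≤ num then
    if PySem.Int.mod num d == 0 then false
    else pvIsPrimeBLoop num (d + 1)
  else true
termination_by (num + 1 - d).toNat
decreasing_by exact pvLoopDec num d h

def pvIsPrimeB (num : Int) : Bool :=
  if num ≤ 1 then false else pvIsPrimeBLoop num 2

def pvOkB (digits : PySem.Set Char) (i : Int) : Bool :=
  pvIsPrimeB i && PySem.Set.issubset (PySem.Set.ofList (PySem.Int.toChars i)) digits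

def pvCountLoopB (n : Int) (digits : PySem.Set Char) (d count : Int) : Int :=
  if h : d * d ≤ n then
    pvCountLoopB n digits (d + 1)
      (if PySem.Int.mod n d == 0 then
        let c1 := if pvOkB digits d then count + 1 else count
        let e := PySem.Int.floordiv n d
        if e != d && pvOkB digits e then c1 + 1 else c1
      else count)
  else count
termination_by (n + 1 - d).toNat
decreasing_by exact pvLoopDec n d h

def count_digit_only_primes_alt (n : Int) : Int :=
  pvCountLoopB n (PySem.Set.ofList (PySem.Int.toChars n)) 1 0

-- ===== PRECONDITION & SPEC =====
def Spec_count_digit_only_primes (n : Int) (out : Int) : Prop := out = count_digit_only_primes_alt n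
instance (n : Int) (out : Int) : Decidable (Spec_count_digit_only_primes n out) := by unfold Spec_count_digit_only_primes; infer_instance

-- ===== CLAIM (what is proved, stated in full; the proofs are below) =====
def Claim_equal_count_digit_only_primes : Prop := ∀ (n : Int), Dom_count_digit_only_primes n → Spec_count_digit_only_primes n (count_digit_only_primes n)

-- ===== LEMMAS AND PROOFS =====

-- the common per-candidate predicate (prime with digits a subset of n's digits), and its 0/1 value
def pvP (n i : Int) : Bool :=
  pvIsPrimeA i && PySem.Set.issubset (PySem.Set.ofList (PySem.Int.toChars i)) (PySem.Set.ofList (PySem.Int.toChars n))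

def pvF (n : Int) (m : ℕ) : ℤ := if pvP n (m : Int) then 1 else 0

-- per-step contribution of B's main loop
def pvG (n : Int) (digits : PySem.Set Char) (d : Int) : Int :=
  if PySem.Int.mod n d == 0 then
    (if pvOkB digits d then 1 else 0) +
    (if (PySem.Int.floordiv n d != d && pvOkB digits (PySem.Int.floordiv n d)) then 1 else 0)
  else 0

-- d*d ≤ num ↔ d ≤ sqrt(num) for 1 ≤ d (everything nonpositive on the right collapses)
theorem pvSq_iff (num d : Int) (hd : 1 ≤ d) : d * d ≤ num ↔ d ≤ (num.toNat.sqrt : Int) := by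
  constructor
  · intro h
    have hn : (0:Int) ≤ num := le_trans (by positivity) h
    have hc : d.toNat * d.toNat ≤ num.toNat := by
      have h1 : ((d.toNat * d.toNat : ℕ) : ℤ) ≤ ((num.toNat : ℕ) : ℤ) := by
        push_cast [Int.toNat_of_nonneg (by omega : (0:Int) ≤ d), Int.toNat_of_nonneg hn]
        exact h
      exact_mod_cast h1
    have := Nat.le_sqrt.mpr hc
    omega
  · intro h
    have hn0 : (0:Int) ≤ num := by
      by_contra hneg
      have h0 : num.toNat = 0 := by omega
      rw [h0] at h
      simp [Nat.sqrt_zero] at h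
      omega
    have hc : d.toNat ≤ num.toNat.sqrt := by omega
    have h2 : d.toNat * d.toNat ≤ num.toNat := Nat.le_sqrt.mp hc
    have h3 : ((d.toNat * d.toNat : ℕ) : ℤ) ≤ ((num.toNat : ℕ) : ℤ) := by exact_mod_cast h2
    push_cast [Int.toNat_of_nonneg (show (0:Int) ≤ d by omega), Int.toNat_of_nonneg hn0] at h3
    exact h3

theorem pvLoopB_eq (num d : Int) (hd : 1 ≤ d) :
    pvIsPrimeBLoop num d =
      (PySem.List.pyRange d ((num.toNat.sqrt : Int) + 1) 1).all (fun i => !(PySem.Int.mod num i == 0)) := by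
  rw [pvIsPrimeBLoop]
  by_cases h : d * d ≤ num
  · have hds : d ≤ (num.toNat.sqrt : Int) := (pvSq_iff num d hd).mp h
    rw [PySem.List.pyRange_one_cons (by omega), List.all_cons]
    by_cases hm : PySem.Int.mod num d == 0
    · simp [h, hm]
    · simp only [h, dif_pos, hm, if_neg, Bool.not_false, Bool.true_and,
        ne_eq, not_false_iff]
      simp only [hm, Bool.not_eq_true] at *
      simp [hm]
      exact pvLoopB_eq num (d + 1) (by omega)
  · have hds : (num.toNat.sqrt : Int) + 1 ≤ d := by
      have := (pvSq_iff num d hd).not.mp h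
      omega
    rw [PySem.List.pyRange_one_eq_nil hds]
    simp [h]
termination_by (num + 1 - d).toNat
decreasing_by exact pvLoopDec num d h

theorem pvPrime_eq (num : Int) : pvIsPrimeB num = pvIsPrimeA num := by
  unfold pvIsPrimeB pvIsPrimeA
  by_cases h : num ≤ 1
  · simp [h]
  · simp only [h, if_false]
    exact pvLoopB_eq num 2 (by omega)

theorem pvFold01 (q : Int → Bool) (l : List Int) : ∀ (a : Int),
    l.foldl (fun c i => if q i then c + 1 else c) a = a + (l.map (fun i => if q i then (1:Int) else 0)).sum := by
  induction l with
  | nil => simp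
  | cons x t ih =>
    intro a
    by_cases h : q x
    · simp only [List.foldl_cons, h, if_pos]
      rw [ih]
      simp [h]
      ring
    · simp only [List.foldl_cons, h, if_neg]
      rw [ih]
      simp [h]

theorem pvCountLoopB_eq (n : Int) (digits : PySem.Set Char) (d : Int) (hd : 1 ≤ d) : ∀ (count : Int),
    pvCountLoopB n digits d count =
      count + ((PySem.List.pyRange d ((n.toNat.sqrt : Int) + 1) 1).map (pvG n digits)).sum := by
  intro count
  rw [pvCountLoopB]
  by_cases h : d * d ≤ n
  · have hds : d ≤ (n.toNat.sqrt : Int) := (pvSq_iff n d hd).mp h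
    rw [PySem.List.pyRange_one_cons (by omega), List.map_cons, List.sum_cons]
    simp only [h, dif_pos]
    rw [pvCountLoopB_eq n digits (d + 1) (by omega)]
    have hstep : (if PySem.Int.mod n d == 0 then
        let c1 := if pvOkB digits d then count + 1 else count
        let e := PySem.Int.floordiv n d
        if e != d && pvOkB digits e then c1 + 1 else c1
      else count) = count + pvG n digits d := by
      unfold pvG
      by_cases hm : PySem.Int.mod n d == 0
      · simp only [hm, if_pos]
        by_cases h1 : pvOkB digits d <;>
          by_cases h2 : PySem.Int.floordiv n d != d && pvOkB digits (PySem.Int.floordiv n d) <;>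
          simp [h1, h2] <;> ring
      · simp [hm]
    rw [hstep]
    ring
  · have hds : (n.toNat.sqrt : Int) + 1 ≤ d := by
      have := (pvSq_iff n d hd).not.mp h
      omega
    rw [PySem.List.pyRange_one_eq_nil hds]
    simp [h]
termination_by (n + 1 - d).toNat
decreasing_by exact pvLoopDec n d h

theorem pvSum_map_range (f : ℕ → ℤ) (m : ℕ) : ((List.range m).map f).sum = ∑ k ∈ Finset.range m, f k := by
  induction m with
  | zero => simp
  | succ m ih => simp [List.range_succ, Finset.sum_range_succ, ih]

-- the sqrt-pairing bijection: divisors above the square root are exactly the cofactors N/d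
-- of the divisors d ≤ sqrt N with N/d ≠ d
theorem pvPair_sum (N : ℕ) (hN : 1 ≤ N) (f : ℕ → ℤ) :
    ∑ d ∈ N.divisors.filter (fun d => d ≤ N.sqrt ∧ N / d ≠ d), f (N / d) =
      ∑ d ∈ N.divisors.filter (fun d => ¬ d ≤ N.sqrt), f d := by
  have hN0 : N ≠ 0 := by omega
  have hs1 : 1 ≤ N.sqrt := by
    have := Nat.sqrt_le_sqrt (show 1 ≤ N from hN)
    simpa using this
  have hsq : N.sqrt * N.sqrt ≤ N := by
    have := Nat.sqrt_le' N
    nlinarith [this]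
  have hsq2 : N < (N.sqrt + 1) * (N.sqrt + 1) := by
    have := Nat.lt_succ_sqrt' N
    nlinarith [this]
  refine Finset.sum_nbij' (fun d => N / d) (fun e => N / e) ?_ ?_ ?_ ?_ ?_
  · intro d hd
    simp only [Finset.mem_filter, Nat.mem_divisors] at hd ⊢
    obtain ⟨⟨hdvd, _⟩, hle, hne⟩ := hd
    have hdpos : 0 < d := Nat.pos_of_dvd_of_pos hdvd (by omega)
    have hcopos : 0 < N / d := Nat.div_pos (Nat.le_of_dvd (by omega) hdvd) hdpos
    have hmul : d * (N / d) = N := Nat.mul_div_cancel' hdvd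
    refine ⟨⟨Nat.div_dvd_of_dvd hdvd, hN0⟩, ?_⟩
    intro hcole
    -- N/d ≤ sqrt N forces d = N/d = sqrt N, contradicting N/d ≠ d
    have h1 : d = N.sqrt := by nlinarith
    have h2 : N / d = N.sqrt := by nlinarith
    exact hne (h2.trans h1.symm)
  · intro e he
    simp only [Finset.mem_filter, Nat.mem_divisors] at he ⊢
    obtain ⟨⟨hdvd, _⟩, hgt⟩ := he
    have hepos : 0 < e := Nat.pos_of_dvd_of_pos hdvd (by omega)
    have hmul : e * (N / e) = N := Nat.mul_div_cancel' hdvd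
    have hcole : N / e ≤ N.sqrt := by nlinarith
    refine ⟨⟨Nat.div_dvd_of_dvd hdvd, hN0⟩, hcole, ?_⟩
    rw [Nat.div_div_self hdvd hN0]
    omega
  · intro d hd
    simp only [Finset.mem_filter, Nat.mem_divisors] at hd
    exact Nat.div_div_self hd.1.1 hN0
  · intro e he
    simp only [Finset.mem_filter, Nat.mem_divisors] at he
    exact Nat.div_div_self he.1.1 hN0
  · intro d _
    rfl

-- `n % i == 0` on candidates from range(1, n+1) is divisibility in ℕ
theorem pvMod_iff (n : Int) (hn : 1 ≤ n) (m : ℕ) :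
    (PySem.Int.mod n ((m : ℕ) : ℤ) = 0) ↔ m ∣ n.toNat := by
  rw [PySem.Int.mod_eq_zero_iff_dvd]
  conv_lhs => rw [show n = ((n.toNat : ℕ) : ℤ) from (Int.toNat_of_nonneg (by omega)).symm]
  exact Int.natCast_dvd_natCast

-- A's count as a divisor sum
theorem pvA_eq (n : Int) (hn : 1 ≤ n) :
    count_digit_only_primes n = ∑ d ∈ (n.toNat).divisors, pvF n d := by
  show (PySem.List.pyRange 1 (n + 1) 1).foldl
      (fun count i =>
        if PySem.Int.mod n i == 0 && pvIsPrimeA i &&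
            PySem.Set.issubset (PySem.Set.ofList (PySem.Int.toChars i))
              (PySem.Set.ofList (PySem.Int.toChars n))
        then count + 1 else count) 0 = _
  rw [pvFold01, PySem.List.pyRange_one, List.map_map, pvSum_map_range, zero_add]
  have hlen : (n + 1 - 1).toNat = n.toNat := by omega
  rw [hlen]
  rw [show (n.toNat).divisors = Finset.filter (· ∣ n.toNat) (Finset.Ico 1 (n.toNat + 1)) from rfl,
    Finset.sum_filter, Finset.sum_Ico_eq_sum_range]
  simp only [Nat.add_sub_cancel]
  refine Finset.sum_congr rfl ?_
  intro k _
  have hm' : PySem.Int.mod n (1 + (k : ℤ)) = 0 ↔ (1 + k) ∣ n.toNat := by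
    rw [show (1 : ℤ) + (k : ℤ) = ((1 + k : ℕ) : ℤ) by push_cast; ring]
    exact pvMod_iff n hn (1 + k)
  by_cases hdvd : (1 + k) ∣ n.toNat
  · simp [Function.comp_apply, pvF, pvP, hm'.mpr hdvd, hdvd]
  · simp only [Function.comp_apply, hdvd, if_neg, not_false_iff]
    simp [hdvd]
    intro hc
    exact absurd (hm'.mp hc) hdvd

-- B's count as the paired divisor sum
theorem pvB_eq (n : Int) (hn : 1 ≤ n) :
    count_digit_only_primes_alt n =
      (∑ d ∈ (n.toNat).divisors.filter (fun d => d ≤ (n.toNat).sqrt), pvF n d) +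
      ∑ d ∈ (n.toNat).divisors.filter (fun d => d ≤ (n.toNat).sqrt ∧ n.toNat / d ≠ d), pvF n (n.toNat / d) := by
  have hok : ∀ i, pvOkB (PySem.Set.ofList (PySem.Int.toChars n)) i = pvP n i := by
    intro i
    unfold pvOkB pvP
    rw [pvPrime_eq]
  unfold count_digit_only_primes_alt
  rw [pvCountLoopB_eq n _ 1 le_rfl 0, PySem.List.pyRange_one, List.map_map, pvSum_map_range, zero_add]
  have hlen : ((n.toNat.sqrt : Int) + 1 - 1).toNat = n.toNat.sqrt := by omega
  rw [hlen]
  have hterm : ∀ k : ℕ, (pvG n (PySem.Set.ofList (PySem.Int.toChars n)) ∘ fun k : ℕ => 1 + (k : ℤ)) k =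
      (fun d : ℕ => if d ∣ n.toNat then
        (pvF n d + if n.toNat / d = d then 0 else pvF n (n.toNat / d)) else 0) (1 + k) := by
    intro k
    have hcast : (1 : ℤ) + (k : ℤ) = ((1 + k : ℕ) : ℤ) := by push_cast; ring
    have hm' : PySem.Int.mod n (1 + (k : ℤ)) = 0 ↔ (1 + k) ∣ n.toNat := by
      rw [hcast]; exact pvMod_iff n hn (1 + k)
    simp only [Function.comp_apply, pvG, hok]
    by_cases hdvd : (1 + k) ∣ n.toNat
    · have hfd : PySem.Int.floordiv n (1 + (k : ℤ)) = ((n.toNat / (1 + k) : ℕ) : ℤ) := by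
        rw [hcast]
        conv_lhs => rw [show n = ((n.toNat : ℕ) : ℤ) from (Int.toNat_of_nonneg (by omega)).symm]
        exact PySem.Int.floordiv_natCast n.toNat (1 + k)
      have hmb : (PySem.Int.mod n (1 + (k : ℤ)) == 0) = true := beq_iff_eq.mpr (hm'.mpr hdvd)
      rw [if_pos hmb, if_pos hdvd, hfd]
      by_cases heq : n.toNat / (1 + k) = 1 + k
      · have hc2 : ((n.toNat / (1 + k) : ℕ) : ℤ) = 1 + (k : ℤ) := by rw [heq, hcast]
        simp [hc2, pvF, heq] 
      · have hne : (((n.toNat / (1 + k) : ℕ) : ℤ) != (1 + (k : ℤ))) = true := by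
          rw [bne_iff_ne, hcast]
          exact fun hc => heq (by exact_mod_cast hc)
        rw [if_neg heq, hne]
        simp only [Bool.true_and]
        by_cases hp1 : pvP n (1 + (k : ℤ)) <;>
          by_cases hp2 : pvP n ((n.toNat / (1 + k) : ℕ) : ℤ) <;>
          simp [hp1, hp2, pvF]
    · have hmb : (PySem.Int.mod n (1 + (k : ℤ)) == 0) = false := by
        rw [beq_eq_false_iff_ne]
        exact fun hc => hdvd (hm'.mp hc)
      rw [if_neg hdvd, hmb]
      simp
  rw [Finset.sum_congr rfl (fun k _ => hterm k)]
  have hIco : ∑ k ∈ Finset.range n.toNat.sqrt,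
      (fun d : ℕ => if d ∣ n.toNat then
        (pvF n d + if n.toNat / d = d then 0 else pvF n (n.toNat / d)) else 0) (1 + k) =
      ∑ d ∈ Finset.Ico 1 (n.toNat.sqrt + 1),
      (if d ∣ n.toNat then (pvF n d + if n.toNat / d = d then 0 else pvF n (n.toNat / d)) else 0) := by
    rw [Finset.sum_Ico_eq_sum_range]
    simp
  rw [hIco, ← Finset.sum_filter]
  have hfil : Finset.filter (fun d => d ∣ n.toNat) (Finset.Ico 1 (n.toNat.sqrt + 1)) =
      (n.toNat).divisors.filter (fun d => d ≤ n.toNat.sqrt) := by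
    ext a
    simp only [Finset.mem_filter, Finset.mem_Ico, Nat.mem_divisors]
    constructor
    · rintro ⟨⟨h1, h2⟩, h3⟩
      exact ⟨⟨h3, by omega⟩, by omega⟩
    · rintro ⟨⟨h1, h2⟩, h3⟩
      have := Nat.pos_of_dvd_of_pos h1 (by omega)
      exact ⟨⟨by omega, by omega⟩, h1⟩
  rw [hfil, Finset.sum_add_distrib]
  congr 1
  have hswap : ∀ d : ℕ, (if n.toNat / d = d then (0:ℤ) else pvF n (n.toNat / d)) =
      (if n.toNat / d ≠ d then pvF n (n.toNat / d) else 0) := by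
    intro d
    by_cases h : n.toNat / d = d <;> simp [h]
  rw [Finset.sum_congr rfl (fun d _ => hswap d), ← Finset.sum_filter, Finset.filter_filter]

-- ===== VERDICT (by name: the statement is the Claim_ definition above) =====
theorem count_digit_only_primes_spec : Claim_equal_count_digit_only_primes := by
  intro n _
  unfold Spec_count_digit_only_primes
  rcases (by omega : n ≤ 0 ∨ 1 ≤ n) with hn | hn
  · -- both loops are empty
    have hA : count_digit_only_primes n = 0 := by
      unfold count_digit_only_primes
      rw [PySem.List.pyRange_one_eq_nil (by omega)]
      rfl
    have hB : count_digit_only_primes_alt n = 0 := by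
      unfold count_digit_only_primes_alt
      rw [pvCountLoopB]
      simp only [show ¬ ((1:Int) * 1 ≤ n) by omega, dif_neg, not_false_iff]
    rw [hA, hB]
  · rw [pvA_eq n (by omega), pvB_eq n (by omega),
      pvPair_sum n.toNat (by omega) (pvF n),
      Finset.sum_filter_add_sum_filter_not]
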